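-- pv_equiv track=rewrite | github.com/JakeSpitznagel/CAMA | generate.py | paddedarray_from_string
-- ===== SOURCE A (Python) =====
-- def paddedarray_from_string(s, length=80, solid_bars=False):
--     if len(s) > length:
--         s = s[:length]
--     s = s.ljust(length)
--
--     s1 = ""
--     multiplier = 2
--     for i in s:
--         for _ in range(multiplier):
--             s1 += i
--
--     top = [[0 for _ in range(length * multiplier)] for _ in range(1)]
--
--     if solid_bars:
--         arr = []
--         for _ in range(2):
--             val = []
--             dirty = False
--             for i in range(len(s1)):
--                 if not s1[i] == "\n" and not s1[i] == " ":
--                     dirty = True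
--                     val.append(1)
--                 elif dirty and s1[i:-1].rstrip() != "":
--                     val.append(1)
--                 else:
--                     val.append(0)
--             arr.append(val)
--     else:
--         arr = [[0 if i == "\n" or i == " " else 1 for i in s1] for _ in range(2)]
--
--     return top + arr  # + bottom
-- ===== SOURCE B (Python) =====
-- def paddedarray_from_string(s, length=80, solid_bars=False):
--     s = s[:length].ljust(length)
--     s1 = "".join(c + c for c in s)
--     top = [[0] * (length * 2)]
--     if solid_bars:
--         n = len(s1)
--         first = next((i for i, c in enumerate(s1) if c != "\n" and c != " "), n)
--         m = len(s1[:-1].rstrip())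
--         row = [1 if c != "\n" and c != " " else (1 if first < i < m else 0)
--                for i, c in enumerate(s1)]
--     else:
--         row = [0 if c == "\n" or c == " " else 1 for c in s1]
--     return top + [row, list(row)]
-- ===== Notes on version B (the rewrite author's own statement) =====
-- stated objective: faster
-- what changed: The per-index dirty flag and the O(n) s1[i:-1].rstrip() suffix re-scan done at every blank position are replaced by two indices computed once (first non-blank index, and the length of the rstripped s1[:-1] as an exclusive last bound), so each row cell is a constant-time threshold test first < i < m; the row is also built once and duplicated instead of running the whole loop twice.
import Mathlib
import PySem

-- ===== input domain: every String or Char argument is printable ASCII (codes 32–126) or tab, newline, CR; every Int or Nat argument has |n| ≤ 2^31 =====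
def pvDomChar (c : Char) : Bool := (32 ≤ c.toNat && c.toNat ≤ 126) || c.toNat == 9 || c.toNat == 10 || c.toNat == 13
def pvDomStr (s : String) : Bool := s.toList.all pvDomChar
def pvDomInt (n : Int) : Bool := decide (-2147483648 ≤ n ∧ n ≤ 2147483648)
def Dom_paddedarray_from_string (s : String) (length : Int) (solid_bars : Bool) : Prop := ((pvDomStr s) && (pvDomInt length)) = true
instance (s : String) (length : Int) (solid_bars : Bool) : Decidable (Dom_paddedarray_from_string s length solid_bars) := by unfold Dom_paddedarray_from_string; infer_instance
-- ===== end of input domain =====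

-- B replaces A's per-position dirty flag and per-position suffix rstrip re-scan by two indices computed
-- once, and builds the row once instead of twice (objective: faster in the solid_bars branch).

-- ===== PORT A =====
-- strings handled as char lists; ljust is ported by hand as pad-with-spaces to the target width (exact)
def paddedarray_from_string (s : String) (length : Int) (solid_bars : Bool) : List (List Int) :=
  let s0 := s.toList
  let sT := if (s0.length : Int) > length then PySem.List.slice s0 none (some length) else s0
  let sP := sT ++ List.replicate (length - (sT.length : Int)).toNat ' '
  let multiplier : Nat := 2
  let s1 := sP.foldl (fun s1 c => (List.range multiplier).foldl (fun s1 _ => s1 ++ [c]) s1) []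
  let top := [(PySem.List.pyRange 0 (length * (multiplier : Int))).map (fun _ => (0 : Int))]
  let arr :=
    if solid_bars then
      (List.range 2).foldl (fun arr _ =>
        let st := (PySem.List.pyRange 0 (s1.length : Int)).foldl
          (fun (st : List Int × Bool) i =>
            let c := PySem.List.pyGetD s1 i ' '
            if !(c == '\n') && !(c == ' ') then (st.1 ++ [(1 : Int)], true)
            else if st.2 && !(PySem.Chars.rstrip (PySem.List.slice s1 (some i) (some (-1))) == []) then
              (st.1 ++ [(1 : Int)], st.2)
            else (st.1 ++ [(0 : Int)], st.2))
          ([], false)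
        arr ++ [st.1]) []
    else
      (List.range 2).foldl (fun arr _ =>
        arr ++ [s1.map (fun c => if c == '\n' || c == ' ' then (0 : Int) else 1)]) []
  top ++ arr

-- ===== PORT B =====
-- next((i for i, c in enumerate(s1) if ...), n) is the first index satisfying the test (n if none) = List.findIdx
def paddedarray_from_string_alt (s : String) (length : Int) (solid_bars : Bool) : List (List Int) :=
  let sT := PySem.List.slice s.toList none (some length)
  let sP := sT ++ List.replicate (length - (sT.length : Int)).toNat ' '
  let s1 := sP.flatMap (fun c => [c, c])
  let top := [List.replicate (length * 2).toNat (0 : Int)]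
  let row :=
    if solid_bars then
      let first := List.findIdx (fun c => !(c == '\n') && !(c == ' ')) s1
      let m := (PySem.Chars.rstrip (PySem.List.slice s1 none (some (-1)))).length
      (PySem.List.enumerate s1).map (fun p =>
        if !(p.2 == '\n') && !(p.2 == ' ') then (1 : Int)
        else if (first : Int) < p.1 ∧ p.1 < (m : Int) then 1 else 0)
    else
      s1.map (fun c => if c == '\n' || c == ' ' then (0 : Int) else 1)
  top ++ [row, row]

-- ===== PRECONDITION & SPEC =====
def Spec_paddedarray_from_string (s : String) (length : Int) (solid_bars : Bool) (out : List (List Int)) : Prop := out = paddedarray_from_string_alt s length solid_bars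
instance (s : String) (length : Int) (solid_bars : Bool) (out : List (List Int)) : Decidable (Spec_paddedarray_from_string s length solid_bars out) := by unfold Spec_paddedarray_from_string; infer_instance

-- ===== CLAIM (what is proved, stated in full; the proofs are below) =====
def Claim_equal_paddedarray_from_string : Prop := ∀ (s : String) (length : Int) (solid_bars : Bool), Dom_paddedarray_from_string s length solid_bars → Spec_paddedarray_from_string s length solid_bars (paddedarray_from_string s length solid_bars)

-- ===== LEMMAS AND PROOFS =====

-- A's conditional truncation followed by ljust equals the unconditional slice s[:length]
lemma pvPre_eq (l : List Char) (L : Int) :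
    (if (l.length : Int) > L then PySem.List.slice l none (some L) else l)
      = PySem.List.slice l none (some L) := by
  split
  · rfl
  · rename_i h
    rw [PySem.List.slice_to l (b := L) (by omega)]
    exact (List.take_of_length_le (by omega)).symm

-- doubling loop = flatMap of pairs
lemma pvDouble (l : List Char) :
    l.foldl (fun s1 c => (List.range 2).foldl (fun s1 _ => s1 ++ [c]) s1) []
      = l.flatMap (fun c => [c, c]) := by
  have h := PySem.List.foldl_congr_mem (l := l) (init := ([] : List Char))
    (f := fun s1 c => (List.range 2).foldl (fun s1 _ => s1 ++ [c]) s1)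
    (g := fun s1 c => s1 ++ [c, c])
    (by intro acc x _; simp [List.range_succ])
  rw [h, PySem.List.foldl_append_eq_flatMap]
  simp

lemma pvTop (L : Int) :
    (PySem.List.pyRange 0 L).map (fun _ => (0 : Int)) = List.replicate L.toNat 0 := by
  rw [PySem.List.pyRange_one]
  simp [List.map_map, Function.comp_def, List.map_const']

lemma pvTwice (row : List Int) :
    (List.range 2).foldl (fun arr _ => arr ++ [row]) [] = [row, row] := by
  simp [List.range_succ]

lemma pvRstrip_cons (c : Char) (v : List Char) :
    PySem.Chars.rstrip (c :: v)
      = if PySem.Chars.rstrip v = [] then (if PySem.Chars.isspace c then [] else [c])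
        else c :: PySem.Chars.rstrip v := by
  show (List.dropWhile PySem.Chars.isspace (c :: v).reverse).reverse = _
  rw [List.reverse_cons, List.dropWhile_append]
  by_cases h : List.dropWhile PySem.Chars.isspace v.reverse = []
  · simp [PySem.Chars.rstrip, h, List.dropWhile]
    split <;> simp_all
  · simp [PySem.Chars.rstrip, h, List.isEmpty_iff, List.reverse_eq_nil_iff]

-- the suffix test: rstrip of a tail is nonempty iff the start index is below the rstripped length
lemma pvL1 (u : List Char) : ∀ k : Nat,
    (PySem.Chars.rstrip (u.drop k) ≠ []) ↔ k < (PySem.Chars.rstrip u).length := by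
  induction u with
  | nil => intro k; simp [PySem.Chars.rstrip]
  | cons c v ih =>
    intro k
    cases k with
    | zero =>
      simp [List.length_pos_iff]
    | succ k' =>
      simp only [List.drop_succ_cons]
      rw [ih k', pvRstrip_cons]
      by_cases h : PySem.Chars.rstrip v = []
      · rw [if_pos h, h]
        by_cases hc : PySem.Chars.isspace c = true
        · rw [if_pos hc]; simp
        · rw [if_neg hc]; simp
      · rw [if_neg h]
        simp only [List.length_cons]
        omega

-- Python s1[k:-1] is (dropLast s1).drop k
lemma pvSlice (xs : List Char) (k : Nat) :
    PySem.List.slice xs (some (k : Int)) (some (-1)) = xs.dropLast.drop k := by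
  rcases eq_or_ne xs [] with rfl | hne
  · simp [PySem.List.slice]
  · have h1 : 1 ≤ xs.length := List.length_pos_of_ne_nil hne
    have hcl : PySem.List.clampIdx xs.length (-1)
        = PySem.List.clampIdx xs.length ((xs.length - 1 : Nat) : Int) := by
      unfold PySem.List.clampIdx
      rw [if_pos (by omega : (-1 : Int) < 0),
          if_neg (by omega : ¬ (((xs.length - 1 : Nat) : Int) < 0)),
          if_neg (show ¬ ((xs.length : Int) + (-1) < 0) by omega)]
      omega
    have hb : PySem.List.slice xs (some (k : Int)) (some (-1))
        = PySem.List.slice xs (some (k : Int)) (some ((xs.length - 1 : Nat) : Int)) := by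
      simp only [PySem.List.slice, hcl]
    rw [hb, PySem.List.slice_natCast, List.dropLast_eq_take, List.drop_take]

-- findIdx bookkeeping for the dirty flag
lemma pvFi_true {l : List Char} {p : Char → Bool} {k : Nat} (hk : k < l.length)
    (h : p l[k] = true) : List.findIdx p l < k + 1 := by
  by_contra h'
  have := List.not_of_lt_findIdx (p := p) (xs := l) (i := k) (by omega)
  exact Bool.noConfusion (h.symm.trans this)

lemma pvFi_false {l : List Char} {p : Char → Bool} {k : Nat} (hk : k < l.length)
    (h : p l[k] = false) : (List.findIdx p l < k + 1) ↔ (List.findIdx p l < k) := by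
  constructor
  · intro h'
    by_contra h2'
    have h2 : k ≤ List.findIdx p l := by omega
    have hlt : k < List.findIdx p l := (List.lt_findIdx_iff l p k).mpr ⟨hk, fun j hj => by
      rcases Nat.lt_or_ge j k with hjk | hjk
      · exact List.not_of_lt_findIdx (by omega)
      · have hjk' : j = k := by omega
        subst hjk'
        exact h⟩
    omega
  · omega

-- the row A's indexed loop produces, characterised position by position
lemma pvLoopA (l : List Char) : ∀ (cnt k : Nat), k + cnt = l.length →
    ∀ (v : List Int) (d : Bool),
    d = decide (List.findIdx (fun c => !(c == '\n') && !(c == ' ')) l < k) →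
    ((PySem.List.pyRange (k : Int) (l.length : Int)).foldl
      (fun (st : List Int × Bool) i =>
        let c := PySem.List.pyGetD l i ' '
        if !(c == '\n') && !(c == ' ') then (st.1 ++ [(1 : Int)], true)
        else if st.2 && !(PySem.Chars.rstrip (PySem.List.slice l (some i) (some (-1))) == []) then
          (st.1 ++ [(1 : Int)], st.2)
        else (st.1 ++ [(0 : Int)], st.2))
      (v, d)).1
    = v ++ (PySem.List.pyRange (k : Int) (l.length : Int)).map (fun i =>
        if !(PySem.List.pyGetD l i ' ' == '\n') && !(PySem.List.pyGetD l i ' ' == ' ') then (1 : Int)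
        else if ((List.findIdx (fun c => !(c == '\n') && !(c == ' ')) l : Int) < i ∧
                 i < ((PySem.Chars.rstrip l.dropLast).length : Int)) then 1 else 0) := by
  intro cnt
  induction cnt with
  | zero =>
    intro k hk v d _
    have : (k : Int) = (l.length : Int) := by omega
    rw [this, PySem.List.pyRange_one]
    simp
  | succ cnt ih =>
    intro k hk v d hd
    have hkn : k < l.length := by omega
    have hlt : (k : Int) < (l.length : Int) := by exact_mod_cast (by omega : k < l.length)
    rw [PySem.List.pyRange_one_cons hlt]
    have hcast : (k : Int) + 1 = ((k + 1 : Nat) : Int) := by push_cast; ring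
    have hget : PySem.List.pyGetD l (k : Int) ' ' = l[k] := by
      rw [PySem.List.pyGetD_natCast, List.getD_eq_getElem _ _ hkn]
    simp only [List.foldl_cons, List.map_cons]
    by_cases hnb : (!(l[k] == '\n') && !(l[k] == ' ')) = true
    · -- non-blank position: 1, dirty becomes true
      simp only [hget, hnb, if_true]
      rw [hcast, ih (k + 1) (by omega) (v ++ [1]) true
        (by symm; rw [decide_eq_true_eq]; exact pvFi_true hkn hnb)]
      simp
    · -- blank position
      have hnb' : (!(l[k] == '\n') && !(l[k] == ' ')) = false := by
        revert hnb; cases (!(l[k] == '\n') && !(l[k] == ' ')) <;> simp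
      simp only [hget, hnb', if_false, Bool.false_eq_true]
      rw [pvSlice l k]
      have hm := pvL1 l.dropLast k
      -- the appended value and the preserved dirty flag
      have hrec : ∀ val : Int,
          ((PySem.List.pyRange ((k : Int) + 1) (l.length : Int)).foldl
            (fun (st : List Int × Bool) i =>
              let c := PySem.List.pyGetD l i ' '
              if !(c == '\n') && !(c == ' ') then (st.1 ++ [(1 : Int)], true)
              else if st.2 && !(PySem.Chars.rstrip (PySem.List.slice l (some i) (some (-1))) == []) then
                (st.1 ++ [(1 : Int)], st.2)
              else (st.1 ++ [(0 : Int)], st.2))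
            (v ++ [val], d)).1
          = (v ++ [val]) ++ (PySem.List.pyRange ((k : Int) + 1) (l.length : Int)).map (fun i =>
              if !(PySem.List.pyGetD l i ' ' == '\n') && !(PySem.List.pyGetD l i ' ' == ' ') then (1 : Int)
              else if ((List.findIdx (fun c => !(c == '\n') && !(c == ' ')) l : Int) < i ∧
                       i < ((PySem.Chars.rstrip l.dropLast).length : Int)) then 1 else 0) := by
        intro val
        rw [hcast]
        exact ih (k + 1) (by omega) (v ++ [val]) d
          (by rw [hd]; simp only [decide_eq_decide]; exact (pvFi_false hkn hnb').symm)
      have hG : (if ((List.findIdx (fun c => !(c == '\n') && !(c == ' ')) l : Int) < (k : Int) ∧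
                   (k : Int) < ((PySem.Chars.rstrip l.dropLast).length : Int)) then (1 : Int) else 0)
          = if d = true ∧ k < (PySem.Chars.rstrip l.dropLast).length then 1 else 0 := by
        rw [hd]
        by_cases h1 : List.findIdx (fun c => !(c == '\n') && !(c == ' ')) l < k <;>
          by_cases h2 : k < (PySem.Chars.rstrip l.dropLast).length <;>
            simp [h1, h2]
      by_cases hd2 : d = true
      · by_cases h2 : k < (PySem.Chars.rstrip l.dropLast).length
        · have : (d && !(PySem.Chars.rstrip (l.dropLast.drop k) == [])) = true := by
            simp [hd2]
            exact hm.mpr h2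
          rw [if_pos this, hrec 1, hG, if_pos ⟨hd2, h2⟩]
          simp
        · have : (d && !(PySem.Chars.rstrip (l.dropLast.drop k) == [])) = false := by
            simp
            intro _
            by_contra hc
            exact h2 (hm.mp hc)
          rw [this, if_neg (by simp), hrec 0, hG, if_neg (by tauto)]
          simp
      · have hdf : d = false := by revert hd2; cases d <;> simp
        have : (d && !(PySem.Chars.rstrip (l.dropLast.drop k) == [])) = false := by
          simp [hdf]
        rw [this, if_neg (by simp), hrec 0, hG, if_neg (by tauto)]
        simp

-- ===== VERDICT (by name: the statement is the Claim_ definition above) =====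
theorem paddedarray_from_string_spec : Claim_equal_paddedarray_from_string := by
  unfold Claim_equal_paddedarray_from_string
  intro s L sb _
  unfold Spec_paddedarray_from_string paddedarray_from_string paddedarray_from_string_alt
  dsimp only
  rw [pvPre_eq s.toList L]
  set sT := PySem.List.slice s.toList none (some L)
  set sP := sT ++ List.replicate (L - (sT.length : Int)).toNat ' '
  rw [pvDouble sP]
  set s1 := sP.flatMap (fun c => [c, c])
  have htop : (PySem.List.pyRange 0 (L * ((2 : Nat) : Int))).map (fun _ => (0 : Int))
      = List.replicate (L * 2).toNat (0 : Int) := by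
    rw [pvTop]; norm_num
  rw [htop]
  congr 1
  cases sb
  · simp only [Bool.false_eq_true, if_false]
    rw [pvTwice]
  · simp only [if_true]
    have hrow := pvLoopA s1 s1.length 0 (by omega) [] false (by simp)
    simp only [Nat.cast_zero] at hrow
    rw [hrow, PySem.List.enumerate_eq_map_pyRange s1 ' ', List.map_map,
        PySem.List.slice_to_neg_one]
    simp [PySem.List.len]
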